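-- pv_equiv track=rewrite | github.com/tobyrcod/AdventofCode2023 | Day 5/day5.py | apply_xy_rules
-- ===== SOURCE A (Python) =====
-- def apply_xy_rules(seed, xy_rules):
--     min_key = -1
--     for key in sorted(xy_rules.keys()):
--         if key > seed:
--             break
--         min_key = key
--
--     diff = 0 if min_key == -1 else xy_rules[min_key] - min_key
--     return seed + diff
-- ===== SOURCE B (Python) =====
-- def apply_xy_rules(seed, xy_rules):
--     min_key = max((k for k in xy_rules if k <= seed), default=-1)
--     diff = 0 if min_key == -1 else xy_rules[min_key] - min_key
--     return seed + diff
-- ===== Notes on version B (the rewrite author's own statement) =====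
-- stated objective: faster
-- what changed: Replaced the sort-then-scan-with-break by a single max() over the keys <= seed (default -1), keeping the sentinel-based diff line unchanged.
import Mathlib
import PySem

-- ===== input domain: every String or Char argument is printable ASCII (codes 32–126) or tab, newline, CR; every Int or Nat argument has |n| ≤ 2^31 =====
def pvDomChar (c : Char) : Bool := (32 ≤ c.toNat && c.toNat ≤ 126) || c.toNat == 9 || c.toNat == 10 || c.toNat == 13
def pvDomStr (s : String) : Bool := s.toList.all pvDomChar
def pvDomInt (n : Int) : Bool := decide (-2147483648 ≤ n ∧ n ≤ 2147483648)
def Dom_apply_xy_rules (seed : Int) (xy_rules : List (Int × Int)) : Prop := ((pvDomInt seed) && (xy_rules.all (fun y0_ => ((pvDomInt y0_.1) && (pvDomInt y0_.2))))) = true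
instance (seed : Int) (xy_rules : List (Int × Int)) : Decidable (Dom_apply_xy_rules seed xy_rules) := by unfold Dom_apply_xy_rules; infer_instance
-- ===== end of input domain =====

-- B replaces A's sort-then-scan-with-break by a single max() over the keys ≤ seed (default -1);
-- the sentinel diff line is unchanged, so behaviour (including the -1-key corner) is identical.

-- ===== PORT A =====
-- 'for key in sorted(xy_rules.keys()): if key > seed: break; min_key = key'
def pvLoopA (seed : Int) : List Int → Int → Int
  | [], min_key => min_key
  | k :: ks, _min_key => if seed < k then _min_key else pvLoopA seed ks k

def apply_xy_rules (seed : Int) (xy_rules : List (Int × Int)) : Int :=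
  let d := PySem.Dict.ofList xy_rules
  let min_key := pvLoopA seed (PySem.List.sorted (PySem.Dict.keys d) (fun k => k) false) (-1)
  -- xy_rules[min_key]: the lookup always succeeds when min_key ≠ -1 sentinel (min_key ∈ keys), so getD is exact
  let diff := if min_key = -1 then 0 else PySem.Dict.getD d min_key 0 - min_key
  seed + diff

-- ===== PORT B =====
def apply_xy_rules_alt (seed : Int) (xy_rules : List (Int × Int)) : Int :=
  let d := PySem.Dict.ofList xy_rules
  -- max((k for k in xy_rules if k <= seed), default=-1)
  let min_key := PySem.List.maxD ((PySem.Dict.keys d).filter (fun k => decide (k ≤ seed))) (fun k => k) (-1)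
  let diff := if min_key = -1 then 0 else PySem.Dict.getD d min_key 0 - min_key
  seed + diff

-- ===== PRECONDITION & SPEC =====
def Spec_apply_xy_rules (seed : Int) (xy_rules : List (Int × Int)) (out : Int) : Prop := out = apply_xy_rules_alt seed xy_rules
instance (seed : Int) (xy_rules : List (Int × Int)) (out : Int) : Decidable (Spec_apply_xy_rules seed xy_rules out) := by unfold Spec_apply_xy_rules; infer_instance

-- ===== CLAIM (what is proved, stated in full; the proofs are below) =====
def Claim_equal_apply_xy_rules : Prop := ∀ (seed : Int) (xy_rules : List (Int × Int)), Dom_apply_xy_rules seed xy_rules → Spec_apply_xy_rules seed xy_rules (apply_xy_rules seed xy_rules)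

-- ===== LEMMAS AND PROOFS =====

-- maxD with key id returns the maximum VALUE: it is permutation-invariant.
theorem pv_maxD_perm (s t : List Int) (hp : s.Perm t) (a : Int) :
    PySem.List.maxD s (fun k => k) a = PySem.List.maxD t (fun k => k) a := by
  cases hs : PySem.List.max? s (fun k => k) with
  | none =>
      have hs' : s = [] := (PySem.List.max?_eq_none_iff s _).mp hs
      subst hs'
      have ht' : t = [] := hp.nil_eq.symm
      subst ht'; rfl
  | some m =>
      cases ht : PySem.List.max? t (fun k => k) with
      | none =>
          have ht' : t = [] := (PySem.List.max?_eq_none_iff t _).mp ht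
          subst ht'
          have : s = [] := hp.eq_nil
          simp [this, PySem.List.max?] at hs
      | some m' =>
          have hm : m ∈ s := PySem.List.max?_mem hs
          have hm' : m' ∈ t := PySem.List.max?_mem ht
          have h1 : m ≤ m' := PySem.List.max?_isMax ht m (hp.mem_iff.mp hm)
          have h2 : m' ≤ m := PySem.List.max?_isMax hs m' (hp.mem_iff.mpr hm')
          simp [PySem.List.maxD, hs, ht, le_antisymm h1 h2]

-- prepending a lower bound does not change the max value (default becomes that bound)
theorem pv_maxD_cons_le (k a : Int) (t : List Int) (h : ∀ y ∈ t, k ≤ y) :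
    PySem.List.maxD (k :: t) (fun x => x) a = PySem.List.maxD t (fun x => x) k := by
  cases ht : PySem.List.max? t (fun x => x) with
  | none =>
      have ht' : t = [] := (PySem.List.max?_eq_none_iff t _).mp ht
      subst ht'
      simp [PySem.List.maxD, PySem.List.max?]
  | some m =>
      cases hkt : PySem.List.max? (k :: t) (fun x => x) with
      | none =>
          have : (k :: t) = [] := (PySem.List.max?_eq_none_iff _ _).mp hkt
          simp at this
      | some m' =>
          have hm : m ∈ t := PySem.List.max?_mem ht
          have hm' : m' ∈ k :: t := PySem.List.max?_mem hkt
          have h1 : m ≤ m' := PySem.List.max?_isMax hkt m (List.mem_cons_of_mem _ hm)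
          have h2 : m' ≤ m := by
            rcases List.mem_cons.mp hm' with h' | h'
            · exact h' ▸ h m hm
            · exact PySem.List.max?_isMax ht m' h'
          simp [PySem.List.maxD, ht, hkt, le_antisymm h1 h2]

-- A's break-loop on a sorted list computes max of the qualifying keys, default the accumulator
theorem pv_loopA_eq (seed : Int) : ∀ (l : List Int), l.Pairwise (· ≤ ·) → ∀ a : Int,
    pvLoopA seed l a = PySem.List.maxD (l.filter (fun k => decide (k ≤ seed))) (fun k => k) a := by
  intro l
  induction l with
  | nil => intro _ a; simp [pvLoopA, PySem.List.maxD, PySem.List.max?]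
  | cons k ks ih =>
      intro hp a
      have hk := (List.pairwise_cons.mp hp).1
      have hks := (List.pairwise_cons.mp hp).2
      by_cases hle : k ≤ seed
      · have : ¬ seed < k := not_lt.mpr hle
        simp only [pvLoopA, this, if_false, List.filter_cons, hle, decide_true, if_true]
        rw [ih hks k]
        rw [pv_maxD_cons_le k a _ (fun y hy => hk y (List.mem_of_mem_filter hy))]
      · have hlt : seed < k := lt_of_not_ge hle
        have hfil : ks.filter (fun k => decide (k ≤ seed)) = [] := by
          apply List.filter_eq_nil_iff.mpr
          intro b hb
          simp only [decide_eq_true_eq]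
          exact not_le.mpr (lt_of_lt_of_le hlt (hk b hb))
        simp [pvLoopA, hlt, hle, hfil, PySem.List.maxD, PySem.List.max?]

-- ===== VERDICT (by name: the statement is the Claim_ definition above) =====
theorem apply_xy_rules_spec : Claim_equal_apply_xy_rules := by
  intro seed xy_rules _
  unfold Spec_apply_xy_rules
  dsimp only [apply_xy_rules, apply_xy_rules_alt]
  have hpw : (PySem.List.sorted (PySem.Dict.keys (PySem.Dict.ofList xy_rules)) (fun k => k) false).Pairwise (· ≤ ·) :=
    PySem.List.sorted_pairwise _ _
  rw [pv_loopA_eq seed _ hpw (-1)]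
  rw [pv_maxD_perm _ _ ((PySem.List.sorted_perm _ _ _).filter _) (-1)]
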